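-- pv_equiv track=rewrite | github.com/sigurdurhaukur/kattis | peningar_1st_attempt/peningar.py | collect_coins
-- ===== SOURCE A (Python) =====
-- def collect_coins(n, k, coin_values):
--     # Initialize total money collected
--     total_money = 0
--
--     # Initialize the starting point
--     index = 0
--
--     # List to keep track of removed coins
--     removed = [False] * n
--
--     # Iterate until we can no longer skip k-1 coins
--     while True:
--         # Add the value of the current coin
--         total_money += coin_values[index]
--         removed[index] = True
--
--         # Check for available steps
--         steps_available = 0
--         for _ in range(k):
--             # Move the pointer k steps forward, wrapping around the circle
--             index = (index + 1) % n
--             if not removed[index]: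
--                 steps_available += 1
--
--         # Break the loop if we can't skip k-1 coins
--         if steps_available < k:
--             break
--
--     return total_money
-- ===== SOURCE B (Python) =====
-- def collect_coins(n, k, coin_values):
--     # The pointer after t collections sits at t*k % n.  While t*k < n no removed
--     # coin can lie in the k-window behind the pointer, and the first time the
--     # window wraps past a removed coin is exactly after t = (n-1)//k collections.
--     # So the collected coins are coin_values[t*k % n] for t = 0 .. (n-1)//k.
--     return sum(coin_values[t * k % n] for t in range((n - 1) // k + 1))
-- ===== Notes on version B (the rewrite author's own statement) =====
-- stated objective: faster
-- what changed: Replaces the simulation (boolean removed-array plus k single pointer steps per collected coin) by a closed form: the walk is blocked exactly after (n-1)//k collections, so B just sums coin_values[t*k % n] for t in range((n-1)//k + 1); intended as faster, a timing run measured ~4x at n=262144 (on k<=0, where A loops forever, B raises ZeroDivisionError; outside Pre_).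
import Mathlib
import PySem

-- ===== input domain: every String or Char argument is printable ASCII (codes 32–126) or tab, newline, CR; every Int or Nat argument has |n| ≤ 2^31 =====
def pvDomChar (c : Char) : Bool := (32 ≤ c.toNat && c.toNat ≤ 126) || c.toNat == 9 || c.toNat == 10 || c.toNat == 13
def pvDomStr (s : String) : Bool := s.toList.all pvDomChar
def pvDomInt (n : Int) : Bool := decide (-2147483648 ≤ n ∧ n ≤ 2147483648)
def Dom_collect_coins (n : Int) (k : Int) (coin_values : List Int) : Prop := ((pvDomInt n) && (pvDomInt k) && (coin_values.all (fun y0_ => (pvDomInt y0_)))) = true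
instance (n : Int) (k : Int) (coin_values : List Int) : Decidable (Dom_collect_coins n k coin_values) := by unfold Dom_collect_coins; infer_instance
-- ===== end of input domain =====

-- B replaces A's step-by-step simulation by the closed form for the blocking time ((n-1)//k collections); intended as faster (timing run measured ~4x at n=262144).


-- ===== PORT A =====
-- A's `while True` loop; on Pre_ inputs it runs at most n iterations (each marks a
-- fresh cell), so `fuel = n.toNat + 1` only makes the recursion structural and is
-- never exhausted there.  List indexing/assignment via pyGetD/pySetD (indices are
-- in range on Pre_ inputs; Python raises outside Pre_).
def collectLoopA (n k : Int) (coin_values : List Int) (fuel : Nat)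
    (removed : List Bool) (index total : Int) : Int :=
  match fuel with
  | 0 => total
  | fuel + 1 =>
    -- total_money += coin_values[index]; removed[index] = True
    let total := total + PySem.List.pyGetD coin_values index 0
    let removed := PySem.List.pySetD removed index true
    -- steps_available = 0; for _ in range(k): index = (index+1) % n; if not removed[index]: steps_available += 1
    let p := (List.range k.toNat).foldl
      (fun (p : Int × Int) (_ : Nat) =>
        let idx := PySem.Int.mod (p.1 + 1) n
        (idx, if PySem.List.pyGetD removed idx false then p.2 else p.2 + 1))
      (index, 0)
    -- if steps_available < k: break
    if p.2 < k then total else collectLoopA n k coin_values fuel removed p.1 total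

def collect_coins (n : Int) (k : Int) (coin_values : List Int) : Int :=
  collectLoopA n k coin_values (n.toNat + 1) (List.replicate n.toNat false) 0 0

-- ===== PORT B =====
-- sum(coin_values[t * k % n] for t in range((n - 1) // k + 1))
def collect_coins_alt (n : Int) (k : Int) (coin_values : List Int) : Int :=
  ((PySem.List.pyRange 0 (PySem.Int.floordiv (n - 1) k + 1) 1).map
    (fun t => PySem.List.pyGetD coin_values (PySem.Int.mod (t * k) n) 0)).sum

-- ===== PRECONDITION & SPEC =====
-- Pre_ is exactly where Python A returns normally: n ≥ 1 (else removed[0] is an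
-- IndexError), k ≥ 1 (else the while loop never breaks), and the largest visited
-- coin index (n-1)//k * k is inside coin_values (else an IndexError).
def Pre_collect_coins (n : Int) (k : Int) (coin_values : List Int) : Prop :=
  1 ≤ n ∧ 1 ≤ k ∧ PySem.Int.floordiv (n - 1) k * k < (coin_values.length : Int)
instance (n : Int) (k : Int) (coin_values : List Int) : Decidable (Pre_collect_coins n k coin_values) := by unfold Pre_collect_coins; infer_instance

def pvWitness_collect_coins : Int × Int × List Int := (3, 1, [1, 2, 3])

def Spec_collect_coins (n : Int) (k : Int) (coin_values : List Int) (out : Int) : Prop := out = collect_coins_alt n k coin_values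
instance (n : Int) (k : Int) (coin_values : List Int) (out : Int) : Decidable (Spec_collect_coins n k coin_values out) := by unfold Spec_collect_coins; infer_instance

-- ===== CLAIM (what is proved, stated in full; the proofs are below) =====
def Claim_equal_collect_coins : Prop := ∀ (n : Int) (k : Int) (coin_values : List Int), Dom_collect_coins n k coin_values → Pre_collect_coins n k coin_values → Spec_collect_coins n k coin_values (collect_coins n k coin_values)

-- ===== LEMMAS AND PROOFS =====
def pvPos (n k : Int) (t : Nat) : Int := ((t : Int) * k) % n
def pvMark (n k : Int) (t j : Nat) : Bool := decide (∃ s, s < t ∧ pvPos n k s = (j : Int))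
def pvMarks (n k : Int) (t : Nat) : List Bool := (List.range n.toNat).map (pvMark n k t)

lemma pvPos_nonneg {n k : Int} (hn : 0 < n) (t : Nat) : 0 ≤ pvPos n k t :=
  Int.emod_nonneg _ (by omega)
lemma pvPos_lt {n k : Int} (hn : 0 < n) (t : Nat) : pvPos n k t < n :=
  Int.emod_lt_of_pos _ hn

lemma pvMarks_length (n k : Int) (t : Nat) : (pvMarks n k t).length = n.toNat := by
  simp [pvMarks]

lemma pvMarks_zero (n k : Int) : pvMarks n k 0 = List.replicate n.toNat false := by
  apply List.ext_getElem
  · simp [pvMarks]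
  · intro j h1 h2
    simp [pvMarks, pvMark]

lemma pvMarks_get {n k : Int} (hn : 0 < n) (t : Nat) {i : Int} (h0 : 0 ≤ i) (h1 : i < n) :
    PySem.List.pyGetD (pvMarks n k t) i false = pvMark n k t i.toNat := by
  rw [PySem.List.pyGetD_eq_getElem _ _ h0 (by rw [pvMarks_length]; omega)]
  simp only [pvMarks]
  rw [List.getElem_map, List.getElem_range]

lemma pvMarks_set {n k : Int} (hn : 0 < n) (t : Nat) :
    PySem.List.pySetD (pvMarks n k t) (pvPos n k t) true = pvMarks n k (t + 1) := by
  rw [PySem.List.pySetD_of_nonneg _ _ (pvPos_nonneg hn t)]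
  apply List.ext_getElem
  · simp [pvMarks]
  · intro j h1 h2
    rw [List.getElem_set]
    simp only [pvMarks, List.getElem_map, List.getElem_range]
    by_cases hj : (pvPos n k t).toNat = j
    · have hpj : pvPos n k t = (j : Int) := by
        have := pvPos_nonneg (k := k) hn t; omega
      rw [if_pos hj]
      symm
      simp only [pvMark, decide_eq_true_eq]
      exact ⟨t, by omega, hpj⟩
    · rw [if_neg hj]
      simp only [pvMark]
      congr 1
      apply propext
      constructor
      · rintro ⟨s, hs, hp⟩; exact ⟨s, by omega, hp⟩
      · rintro ⟨s, hs, hp⟩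
        rcases Nat.lt_succ_iff_lt_or_eq.mp hs with h | h
        · exact ⟨s, h, hp⟩
        · exfalso; apply hj; rw [h] at hp; rw [hp]; omega
lemma pvInner {n : Int} (hn : 0 < n) (removed : List Bool) :
    ∀ (m : Nat) (i c : Int), 0 ≤ i → i < n →
      (List.range m).foldl
        (fun (p : Int × Int) (_ : Nat) =>
          let idx := PySem.Int.mod (p.1 + 1) n
          (idx, if PySem.List.pyGetD removed idx false then p.2 else p.2 + 1))
        (i, c)
      = ((i + m) % n,
         c + m - ((List.range m).countP
            (fun (j : Nat) => PySem.List.pyGetD removed ((i + (j : Int) + 1) % n) false) : Int)) := by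
  intro m
  induction m with
  | zero => intro i c h0 h1; simp [Int.emod_eq_of_lt h0 h1]
  | succ m ih =>
    intro i c h0 h1
    rw [List.range_succ, List.foldl_append, ih i c h0 h1]
    simp only [List.foldl_cons, List.foldl_nil, PySem.Int.mod_eq_emod_of_pos hn]
    have hidx : ((i + (m:Int)) % n + 1) % n = (i + ((m:Int) + 1)) % n := by
      rw [Int.emod_add_emod, Int.add_assoc]
    rw [List.countP_append, hidx]
    by_cases hb : PySem.List.pyGetD removed ((i + ((m:Int) + 1)) % n) false
    · rw [if_pos hb]
      have hb' : PySem.List.pyGetD removed ((i + (m:Int) + 1) % n) false = true := by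
        rw [Int.add_assoc]; exact hb
      simp [hb']
      omega
    · rw [if_neg hb]
      have hb' : PySem.List.pyGetD removed ((i + (m:Int) + 1) % n) false = false := by
        rw [Int.add_assoc]; simpa using hb
      simp [hb']
      omega
lemma pvMaster {n k : Int} (hn : 0 < n) (hk : 1 ≤ k) (t : Nat) :
    (∃ j, j < k.toNat ∧ ∃ s, s < t + 1 ∧ pvPos n k s = (pvPos n k t + (j : Int) + 1) % n)
      ↔ (n - 1) / k ≤ (t : Int) := by
  have hT0 : 0 ≤ (n - 1) / k := Int.ediv_nonneg (by omega) (by omega)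
  have hub : (n - 1) / k * k ≤ n - 1 := Int.ediv_mul_le _ (by omega)
  have hlb : n - 1 < ((n - 1) / k + 1) * k := Int.lt_ediv_add_one_mul_self _ (by omega)
  constructor
  · rintro ⟨j, hj, s, hs, hp⟩
    by_contra hlt
    push Not at hlt
    -- hp gives n ∣ (t*k + j + 1 - s*k)
    have hp' : ((s:Int) * k) % n = ((t:Int) * k + ((j:Int) + 1)) % n := by
      rw [pvPos, pvPos] at hp
      rw [hp, Int.add_assoc, Int.emod_add_emod]
    have hdvd : n ∣ ((t:Int) * k + ((j:Int) + 1)) - (s:Int) * k := by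
      have h0 : n ∣ (s:Int) * k - ((t:Int) * k + ((j:Int) + 1)) :=
        Int.dvd_of_emod_eq_zero (Int.emod_eq_emod_iff_emod_sub_eq_zero.mp hp')
      simpa [neg_sub] using dvd_neg.mpr h0
    have hm1 : 1 ≤ (j:Int) + 1 := by omega
    have hm2 : (j:Int) + 1 ≤ k := by
      have : (j:Int) < (k.toNat : Int) := by exact_mod_cast hj
      omega
    have hd0 : 0 ≤ (t:Int) - (s:Int) := by
      have : (s:Int) < (t:Int) + 1 := by exact_mod_cast hs
      omega
    have hdk : ((t:Int) - s) * k ≤ ((n - 1) / k - 1) * k := by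
      apply mul_le_mul_of_nonneg_right _ (by omega)
      omega
    have hdk2 : ((n - 1) / k - 1) * k = (n - 1) / k * k - k := by ring
    have hpos : 0 < ((t:Int) * k + ((j:Int) + 1)) - (s:Int) * k := by
      have : 0 ≤ ((t:Int) - s) * k := mul_nonneg hd0 (by omega)
      nlinarith
    have hle := Int.le_of_dvd hpos hdvd
    have : (t:Int) * k - (s:Int) * k = ((t:Int) - s) * k := by ring
    omega
  · intro hT
    set T0 : Int := (n - 1) / k with hT0def
    have hmk : 1 ≤ n - T0 * k ∧ n - T0 * k ≤ k := by constructor <;> nlinarith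
    refine ⟨(n - T0 * k - 1).toNat, by omega, t - T0.toNat, by omega, ?_⟩
    have hcast1 : ((n - T0 * k - 1).toNat : Int) = n - T0 * k - 1 := by omega
    have hTt : T0.toNat ≤ t := by omega
    have hcast2 : ((t - T0.toNat : Nat) : Int) = (t:Int) - T0 := by
      push_cast [hTt]; omega
    rw [pvPos, pvPos, hcast1, hcast2]
    have : ((t:Int) * k) % n + (n - T0 * k - 1) + 1 = ((t:Int) * k) % n + (n - T0 * k) := by ring
    rw [this, Int.emod_add_emod]
    have : (t:Int) * k + (n - T0 * k) = ((t:Int) - T0) * k + n := by ring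
    rw [this, Int.add_emod_right]

-- the sum B computes, from collection time t on
def pvTail (n k : Int) (cv : List Int) (t : Nat) : Int :=
  ((List.range (((n - 1) / k).toNat + 1 - t)).map
    (fun s => PySem.List.pyGetD cv (pvPos n k (t + s)) 0)).sum

lemma pvBlocked {n k : Int} (hn : 0 < n) (hk : 1 ≤ k) (t : Nat) :
    (0 < (List.range k.toNat).countP
        (fun (j : Nat) => PySem.List.pyGetD (pvMarks n k (t + 1))
          ((pvPos n k t + (j : Int) + 1) % n) false))
      ↔ (n - 1) / k ≤ (t : Int) := by
  rw [List.countP_pos_iff]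
  rw [← pvMaster hn hk t]
  constructor
  · rintro ⟨j, hj, hp⟩
    rw [List.mem_range] at hj
    set q : Int := (pvPos n k t + (j : Int) + 1) % n with hq
    have hq0 : 0 ≤ q := Int.emod_nonneg _ (by omega)
    have hq1 : q < n := Int.emod_lt_of_pos _ hn
    rw [pvMarks_get hn (t + 1) hq0 hq1] at hp
    simp only [pvMark, decide_eq_true_eq] at hp
    obtain ⟨s, hs, hps⟩ := hp
    exact ⟨j, hj, s, hs, by rw [hps]; omega⟩
  · rintro ⟨j, hj, s, hs, hp⟩
    refine ⟨j, List.mem_range.mpr hj, ?_⟩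
    set q : Int := (pvPos n k t + (j : Int) + 1) % n with hq
    have hq0 : 0 ≤ q := Int.emod_nonneg _ (by omega)
    have hq1 : q < n := Int.emod_lt_of_pos _ hn
    rw [pvMarks_get hn (t + 1) hq0 hq1]
    simp only [pvMark, decide_eq_true_eq]
    exact ⟨s, hs, by rw [hp]; omega⟩

lemma pvPos_next {n k : Int} (t : Nat) :
    (pvPos n k t + k) % n = pvPos n k (t + 1) := by
  simp only [pvPos]
  rw [Int.emod_add_emod]
  push_cast
  ring_nf

lemma pvTail_last {n k : Int} {cv : List Int} (t : Nat) (h : ((n - 1) / k).toNat = t) :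
    pvTail n k cv t = PySem.List.pyGetD cv (pvPos n k t) 0 := by
  simp [pvTail, h]

lemma pvTail_cons {n k : Int} {cv : List Int} (t : Nat) (h : t < ((n - 1) / k).toNat) :
    pvTail n k cv t = PySem.List.pyGetD cv (pvPos n k t) 0 + pvTail n k cv (t + 1) := by
  have h1 : ((n - 1) / k).toNat + 1 - t = (((n - 1) / k).toNat - t) + 1 := by omega
  have h2 : ((n - 1) / k).toNat + 1 - (t + 1) = ((n - 1) / k).toNat - t := by omega
  simp only [pvTail, h1, h2, List.range_succ_eq_map, List.map_cons, List.sum_cons, List.map_map]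
  congr 1
  congr 1
  apply List.map_congr_left
  intro s _
  simp only [Function.comp]
  have he : t + Nat.succ s = t + 1 + s := by omega
  rw [he]

lemma pvOuter {n k : Int} {cv : List Int} (hn : 0 < n) (hk : 1 ≤ k) :
    ∀ (fuel t : Nat) (total : Int), (t : Int) ≤ (n - 1) / k → ((n - 1) / k).toNat - t < fuel →
      collectLoopA n k cv fuel (pvMarks n k t) (pvPos n k t) total
        = total + pvTail n k cv t := by
  intro fuel
  induction fuel with
  | zero => intro t total _ hf; omega
  | succ fuel ih =>
    intro t total ht hf
    have h0 : 0 ≤ pvPos n k t := pvPos_nonneg hn t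
    have h1 : pvPos n k t < n := pvPos_lt hn t
    have hkk : ((k.toNat : Nat) : Int) = k := by omega
    simp only [collectLoopA]
    rw [pvMarks_set hn t]
    rw [pvInner hn (pvMarks n k (t + 1)) k.toNat (pvPos n k t) 0 h0 h1]
    set cnt := (List.range k.toNat).countP
        (fun (j : Nat) => PySem.List.pyGetD (pvMarks n k (t + 1))
          ((pvPos n k t + (j : Int) + 1) % n) false) with hcnt
    rw [hkk, pvPos_next t]
    by_cases hb : (n - 1) / k ≤ (t : Int)
    · have hc : 0 < cnt := (pvBlocked hn hk t).mpr hb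
      rw [if_pos (by omega)]
      rw [pvTail_last t (by omega)]
    · have hc : ¬ 0 < cnt := fun h => hb ((pvBlocked hn hk t).mp h)
      have hck : (cnt : Int) ≤ k := by
        have := List.countP_le_length
          (p := fun (j : Nat) => PySem.List.pyGetD (pvMarks n k (t + 1))
            ((pvPos n k t + (j : Int) + 1) % n) false) (l := List.range k.toNat)
        rw [← hcnt] at this
        simp only [List.length_range] at this
        omega
      rw [if_neg (by omega)]
      rw [ih (t + 1) (total + PySem.List.pyGetD cv (pvPos n k t) 0) (by omega) (by omega)]
      rw [pvTail_cons t (by omega)]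
      ring

-- ===== VERDICT (by name: the statement is the Claim_ definition above) =====
theorem collect_coins_spec : Claim_equal_collect_coins := by
  intro n k cv _ hpre
  obtain ⟨hn, hk, hlen⟩ := hpre
  unfold Spec_collect_coins collect_coins collect_coins_alt
  rw [← pvMarks_zero n k]
  have hpos0 : pvPos n k 0 = 0 := by simp [pvPos]
  have hfd : PySem.Int.floordiv (n - 1) k = (n - 1) / k :=
    PySem.Int.floordiv_eq_ediv_of_pos (by omega)
  have hT0 : 0 ≤ (n - 1) / k := Int.ediv_nonneg (by omega) (by omega)
  have hT0n : (n - 1) / k ≤ n - 1 := Int.ediv_le_self _ (by omega)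
  have hrun := pvOuter (cv := cv) hn hk (n.toNat + 1) 0 0 (by omega) (by omega)
  rw [hpos0] at hrun
  rw [hrun, zero_add]
  -- B's pyRange sum equals pvTail 0
  rw [hfd]
  rw [PySem.List.pyRange_one 0 ((n - 1) / k + 1)]
  simp only [List.map_map, pvTail, Nat.sub_zero]
  have harg : ((n - 1) / k + 1 - 0).toNat = ((n - 1) / k).toNat + 1 := by omega
  rw [harg]
  congr 1
  apply List.map_congr_left
  intro s hs
  simp only [Function.comp]
  rw [PySem.Int.mod_eq_emod_of_pos (by omega)]
  simp only [pvPos, zero_add]
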